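-- pv_equiv track=rewrite | github.com/feichuanshuo/DPC_tools | utils/__init__.py | dalvik_to_java_type
-- ===== SOURCE A (Python) =====
-- def dalvik_to_java_type(dalvik_type):
--     """将 Dalvik 字节码类型转换为 Java 类型"""
--     basic_types = {
--         'Z': 'boolean',
--         'B': 'byte',
--         'S': 'short',
--         'C': 'char',
--         'I': 'int',
--         'J': 'long',
--         'F': 'float',
--         'D': 'double',
--         'V': 'void'
--     }
--
--     if dalvik_type.startswith('L') and dalvik_type.endswith(';'):
--         # 对象类型
--         return dalvik_type[1:-1].replace('/', '.')
--     elif dalvik_type.startswith('['):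
--         # 数组类型
--         depth = 0
--         while dalvik_type[depth] == '[':
--             depth += 1
--         base_type = dalvik_to_java_type(dalvik_type[depth:])
--         return base_type + '[]' * depth
--     else:
--         # 基本类型
--         return basic_types.get(dalvik_type, dalvik_type)
-- ===== SOURCE B (Python) =====
-- def dalvik_to_java_type(dalvik_type):
--     """将 Dalvik 字节码类型转换为 Java 类型"""
--     basic_types = {
--         'Z': 'boolean',
--         'B': 'byte',
--         'S': 'short',
--         'C': 'char',
--         'I': 'int',
--         'J': 'long',
--         'F': 'float',
--         'D': 'double',
--         'V': 'void'
--     }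
--     depth = 0
--     n = len(dalvik_type)
--     while depth < n and dalvik_type[depth] == '[':
--         depth += 1
--     base = dalvik_type[depth:]
--     if base.startswith('L') and base.endswith(';'):
--         java = base[1:-1].replace('/', '.')
--     else:
--         java = basic_types.get(base, base)
--     return java + '[]' * depth
-- ===== Notes on version B (the rewrite author's own statement) =====
-- stated objective: simpler
-- what changed: B replaces A's recursion on the stripped array suffix by a single bounded loop that counts the leading '[' characters, classifies the remaining base type once (object or basic-type lookup) and appends '[]'*depth.
-- crash fix: On nonempty strings consisting only of '[' A raises IndexError in its unguarded depth loop; B counts the brackets with a bounded loop and returns '[]' repeated that many times. — e.g. on dalvik_to_java_type("[["): A raises IndexError, B returns "[][]"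
import Mathlib
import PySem

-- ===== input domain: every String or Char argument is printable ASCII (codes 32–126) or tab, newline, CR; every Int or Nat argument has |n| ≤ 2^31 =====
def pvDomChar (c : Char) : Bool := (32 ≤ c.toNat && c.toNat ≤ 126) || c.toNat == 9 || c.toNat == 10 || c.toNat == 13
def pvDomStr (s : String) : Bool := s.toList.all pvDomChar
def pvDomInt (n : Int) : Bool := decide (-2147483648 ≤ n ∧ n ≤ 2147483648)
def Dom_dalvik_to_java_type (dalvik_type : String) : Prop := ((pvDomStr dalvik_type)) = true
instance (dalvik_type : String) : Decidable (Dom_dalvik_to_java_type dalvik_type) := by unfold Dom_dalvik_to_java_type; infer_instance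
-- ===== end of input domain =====

-- B replaces A's recursion on the array suffix by one bracket-counting loop plus a single base-type
-- classification; equivalence is about the return value on Pre_ (A raises IndexError on all-'[' strings).

-- ===== PORT A =====
-- the basic_types dict (char-list level, insertion order as in A)
def pvBasicTypesA : PySem.Dict (List Char) (List Char) :=
  PySem.Dict.ofList
    [ (['Z'], ['b','o','o','l','e','a','n'])
    , (['B'], ['b','y','t','e'])
    , (['S'], ['s','h','o','r','t'])
    , (['C'], ['c','h','a','r'])
    , (['I'], ['i','n','t'])
    , (['J'], ['l','o','n','g'])
    , (['F'], ['f','l','o','a','t'])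
    , (['D'], ['d','o','u','b','l','e'])
    , (['V'], ['v','o','i','d']) ]

-- A's unguarded `while dalvik_type[depth] == '['` loop: exact wherever Python does not raise;
-- on all-'[' strings Python raises IndexError (excluded by Pre_) while this stops at the end.
def pvDepthA : List Char → Nat
  | c :: rest => if c = '[' then pvDepthA rest + 1 else 0
  | [] => 0

theorem pvDepthA_pos (rest : List Char) : 0 < pvDepthA ('[' :: rest) := by
  simp [pvDepthA]

theorem pv_startswith_cons (c : Char) (rest : List Char) (p : Char) :
    PySem.Chars.startswith (c :: rest) [p] = (c == p) := by
  by_cases h : c = p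
  · simp [PySem.Chars.startswith, List.isPrefixOf, h]
  · have h2 : ¬ p = c := fun e => h e.symm
    simp [PySem.Chars.startswith, List.isPrefixOf, h, h2]

theorem pv_startswith_nil (p : Char) : PySem.Chars.startswith [] [p] = false := by
  simp [PySem.Chars.startswith, List.isPrefixOf]

theorem pv_drop_depth_lt (l : List Char) (h : PySem.Chars.startswith l ['['] = true) :
    (l.drop (pvDepthA l)).length < l.length := by
  cases l with
  | nil => rw [pv_startswith_nil] at h; exact absurd h (by decide)
  | cons c rest =>
    rw [pv_startswith_cons] at h
    have hc : c = '[' := by simpa using h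
    subst hc
    have hd := pvDepthA_pos rest
    rw [List.length_drop]
    simp only [List.length_cons]
    omega

-- A, step for step, on the code-point list (object branch, array branch with recursion, dict default)
def pvA : List Char → List Char
  | l =>
    if PySem.Chars.startswith l ['L'] && PySem.Chars.endswith l [';'] then
      PySem.Chars.replace (PySem.List.slice l (some 1) (some (-1))) ['/'] ['.']
    else if h : PySem.Chars.startswith l ['['] then
      -- dalvik_type[depth:] then '[]' * depth
      pvA (l.drop (pvDepthA l)) ++ PySem.List.pyRepeat ['[', ']'] (pvDepthA l)
    else
      PySem.Dict.getD pvBasicTypesA l l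
  termination_by l => l.length
  decreasing_by
    simpa using pv_drop_depth_lt _ h

def dalvik_to_java_type (dalvik_type : String) : String :=
  String.ofList (pvA dalvik_type.toList)

-- ===== PORT B =====
def pvBasicTypesB : PySem.Dict (List Char) (List Char) :=
  PySem.Dict.ofList
    [ (['Z'], ['b','o','o','l','e','a','n'])
    , (['B'], ['b','y','t','e'])
    , (['S'], ['s','h','o','r','t'])
    , (['C'], ['c','h','a','r'])
    , (['I'], ['i','n','t'])
    , (['J'], ['l','o','n','g'])
    , (['F'], ['f','l','o','a','t'])
    , (['D'], ['d','o','u','b','l','e'])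
    , (['V'], ['v','o','i','d']) ]

-- B's guarded `while depth < n and dalvik_type[depth] == '['` loop: exact on every input
def pvDepthB : List Char → Nat
  | c :: rest => if c = '[' then pvDepthB rest + 1 else 0
  | [] => 0

-- B's one-shot classification of the bracket-free base type
def pvClassify (base : List Char) : List Char :=
  if PySem.Chars.startswith base ['L'] && PySem.Chars.endswith base [';'] then
    PySem.Chars.replace (PySem.List.slice base (some 1) (some (-1))) ['/'] ['.']
  else
    PySem.Dict.getD pvBasicTypesB base base

def pvB (l : List Char) : List Char :=
  let depth := pvDepthB l
  let base := l.drop depth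
  pvClassify base ++ PySem.List.pyRepeat ['[', ']'] depth

def dalvik_to_java_type_alt (dalvik_type : String) : String :=
  String.ofList (pvB dalvik_type.toList)

-- ===== PRECONDITION & SPEC =====
-- Pre_ excludes exactly the nonempty all-'[' strings, on which Python A raises IndexError.
def Pre_dalvik_to_java_type (dalvik_type : String) : Prop :=
  dalvik_type.toList = [] ∨ ¬ (dalvik_type.toList.all (· == '[') = true)
instance (dalvik_type : String) : Decidable (Pre_dalvik_to_java_type dalvik_type) := by
  unfold Pre_dalvik_to_java_type; infer_instance

def pvWitness_dalvik_to_java_type : String := "[Ljava/lang/String;"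

-- On nonempty strings consisting only of '[' A raises IndexError in its unguarded depth loop;
-- B counts the brackets with a bounded loop and returns '[]' repeated that many times.
def Raises_dalvik_to_java_type (dalvik_type : String) : Prop :=
  dalvik_type.toList ≠ [] ∧ dalvik_type.toList.all (· == '[') = true
instance (dalvik_type : String) : Decidable (Raises_dalvik_to_java_type dalvik_type) := by
  unfold Raises_dalvik_to_java_type; infer_instance
def pvRaiseWitness_dalvik_to_java_type : String := "[["
def pvRaiseWitnessOut_dalvik_to_java_type : String := "[][]"

def Spec_dalvik_to_java_type (dalvik_type : String) (out : String) : Prop :=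
  out = dalvik_to_java_type_alt dalvik_type
instance (dalvik_type : String) (out : String) : Decidable (Spec_dalvik_to_java_type dalvik_type out) := by
  unfold Spec_dalvik_to_java_type; infer_instance

-- ===== CLAIM (what is proved, stated in full; the proofs are below) =====
def Claim_equal_dalvik_to_java_type : Prop := ∀ (dalvik_type : String), Dom_dalvik_to_java_type dalvik_type → Pre_dalvik_to_java_type dalvik_type → Spec_dalvik_to_java_type dalvik_type (dalvik_to_java_type dalvik_type)

def Claim_raises_dalvik_to_java_type : Prop := (∀ (dalvik_type : String), Dom_dalvik_to_java_type dalvik_type → Raises_dalvik_to_java_type dalvik_type → ¬ Pre_dalvik_to_java_type dalvik_type) ∧ (Dom_dalvik_to_java_type (pvRaiseWitness_dalvik_to_java_type) ∧ Raises_dalvik_to_java_type (pvRaiseWitness_dalvik_to_java_type) ∧ dalvik_to_java_type_alt (pvRaiseWitness_dalvik_to_java_type) = pvRaiseWitnessOut_dalvik_to_java_type)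

-- ===== LEMMAS AND PROOFS =====

theorem pvDepthB_eq_A (l : List Char) : pvDepthB l = pvDepthA l := by
  induction l with
  | nil => rfl
  | cons c rest ih => simp [pvDepthA, pvDepthB, ih]

theorem pvDepthA_eq_zero (l : List Char) (h : PySem.Chars.startswith l ['['] = false) :
    pvDepthA l = 0 := by
  cases l with
  | nil => rfl
  | cons c rest =>
    rw [pv_startswith_cons] at h
    simp only [beq_eq_false_iff_ne, ne_eq] at h
    simp [pvDepthA, h]

-- the base left after stripping the counted brackets never starts with '['
theorem drop_pvDepthA_not_bracket (l : List Char) :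
    PySem.Chars.startswith (l.drop (pvDepthA l)) ['['] = false := by
  induction l with
  | nil => exact pv_startswith_nil '['
  | cons c rest ih =>
    by_cases h : c = '['
    · subst h; simpa [pvDepthA] using ih
    · simp [pvDepthA, h, pv_startswith_cons]

-- outside the array branch, A computes exactly B's classification
theorem pvA_no_bracket (l : List Char) (h : PySem.Chars.startswith l ['['] = false) :
    pvA l = pvClassify l := by
  rw [pvA, pvClassify]
  simp [h, pvBasicTypesA, pvBasicTypesB]

theorem pvA_eq_pvB (l : List Char) : pvA l = pvB l := by
  by_cases h : PySem.Chars.startswith l ['['] = true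
  · have hL : PySem.Chars.startswith l ['L'] = false := by
      cases l with
      | nil => simp [pv_startswith_nil]
      | cons c rest =>
        rw [pv_startswith_cons] at h ⊢
        have hc : c = '[' := by simpa using h
        subst hc; decide
    rw [pvA]
    simp only [hL, Bool.false_and, if_neg (by decide : ¬ (false = true)), dif_pos h]
    rw [pvA_no_bracket _ (drop_pvDepthA_not_bracket l)]
    simp [pvB, pvDepthB_eq_A]
  · simp only [Bool.not_eq_true] at h
    rw [pvA_no_bracket l h, pvB]
    simp [pvDepthB_eq_A, pvDepthA_eq_zero l h, PySem.List.pyRepeat]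

-- ===== VERDICT (by name: the statement is the Claim_ definition above) =====
theorem dalvik_to_java_type_spec : Claim_equal_dalvik_to_java_type := by
  intro s _ _
  unfold Spec_dalvik_to_java_type dalvik_to_java_type dalvik_to_java_type_alt
  rw [pvA_eq_pvB]

set_option maxRecDepth 8000 in
@[simp] theorem dalvik_to_java_type_raises : Claim_raises_dalvik_to_java_type := by
  unfold Claim_raises_dalvik_to_java_type
  refine ⟨?_, by decide⟩
  intro s _ hr hp
  rcases hp with h | h
  · exact hr.1 h
  · exact h hr.2
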